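-- pv_equiv track=rewrite | github.com/letapicode/ASI | src/collective_constitution.py | label_responses
-- ===== SOURCE A (Python) =====
-- from typing import Iterable, List, Tuple
--
-- def label_responses(responses: Iterable[str], rules: Iterable[str]) -> List[Tuple[str, bool]]:
--     """Label responses as safe if they do not violate any rule."""
--     compiled = [r.lower() for r in rules]
--     labelled = []
--     for resp in responses:
--         text = resp.lower()
--         safe = not any(rule in text for rule in compiled)
--         labelled.append((resp, safe))
--     return labelled
-- ===== SOURCE B (Python) =====
-- from typing import Iterable, List, Tuple
--
-- def label_responses(responses: Iterable[str], rules: Iterable[str]) -> List[Tuple[str, bool]]: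
--     """Label responses as safe if they do not violate any rule.
--
--     Rule-major staged passes: keep a parallel boolean vector 'safe' over the
--     responses and sweep it once per rule, clearing entries the rule hits;
--     finally zip responses with the surviving flags."""
--     responses = list(responses)
--     lowered = [r.lower() for r in responses]
--     safe = [True] * len(responses)
--     for rule in rules:
--         rl = rule.lower()
--         safe = [s and rl not in t for s, t in zip(safe, lowered)]
--     return list(zip(responses, safe))
-- ===== Notes on version B (the rewrite author's own statement) =====
-- stated objective: alternative
-- what changed: B transposes the loops: instead of A's response-major loop testing every rule inside, B keeps a parallel boolean safe-vector over the responses and does one staged pass per rule clearing the entries that rule hits, then zips responses with the surviving flags.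
import Mathlib
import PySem

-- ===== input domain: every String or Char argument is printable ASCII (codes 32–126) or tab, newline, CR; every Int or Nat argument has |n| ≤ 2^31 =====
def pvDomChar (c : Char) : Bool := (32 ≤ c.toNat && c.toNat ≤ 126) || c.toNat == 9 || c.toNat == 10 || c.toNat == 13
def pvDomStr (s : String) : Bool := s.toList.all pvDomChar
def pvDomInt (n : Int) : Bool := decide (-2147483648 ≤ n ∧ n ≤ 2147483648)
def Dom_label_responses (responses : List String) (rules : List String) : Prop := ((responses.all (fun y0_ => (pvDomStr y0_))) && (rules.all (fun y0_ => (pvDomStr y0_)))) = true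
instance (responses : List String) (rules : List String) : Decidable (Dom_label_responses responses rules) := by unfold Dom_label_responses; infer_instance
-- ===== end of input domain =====

-- B transposes the loops: a parallel boolean safe-vector swept once per rule, then zipped with the responses (objective: alternative).

-- ===== PORT A =====
def label_responses (responses : List String) (rules : List String) : List (String × Bool) :=
  let compiled := rules.map (fun r => PySem.Str.lower r)
  responses.foldl (fun labelled resp =>
    let text := PySem.Str.lower resp
    let safe := ! (compiled.any (fun rule => PySem.Str.isIn rule text))
    labelled ++ [(resp, safe)]) []

-- ===== PORT B =====
def label_responses_alt (responses : List String) (rules : List String) : List (String × Bool) :=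
  let lowered := responses.map (fun r => PySem.Str.lower r)
  let safe := rules.foldl (fun safe rule =>
    let rl := PySem.Str.lower rule
    (safe.zip lowered).map (fun p => p.1 && ! PySem.Str.isIn rl p.2))
    (List.replicate responses.length true)
  responses.zip safe

-- ===== PRECONDITION & SPEC =====
def Spec_label_responses (responses : List String) (rules : List String) (out : List (String × Bool)) : Prop := out = label_responses_alt responses rules
instance (responses : List String) (rules : List String) (out : List (String × Bool)) : Decidable (Spec_label_responses responses rules out) := by unfold Spec_label_responses; infer_instance

-- ===== CLAIM (what is proved, stated in full; the proofs are below) =====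
def Claim_equal_label_responses : Prop := ∀ (responses : List String) (rules : List String), Dom_label_responses responses rules → Spec_label_responses responses rules (label_responses responses rules)

-- ===== LEMMAS AND PROOFS =====

-- zipping a mapped zip back with the same right list keeps the pair structure
lemma zip_map_left_zip {α β γ : Type} (xs : List α) (ys : List β) (f : α × β → γ) :
    ((xs.zip ys).map f).zip ys = (xs.zip ys).map (fun p => (f p, p.2)) := by
  induction xs generalizing ys with
  | nil => simp
  | cons x xs ih => cases ys with
    | nil => simp
    | cons y ys => simp [ih]

lemma zip_map_fst {α β : Type} (xs : List α) (ys : List β) (h : xs.length = ys.length) :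
    (xs.zip ys).map (fun p => p.1) = xs := by
  induction xs generalizing ys with
  | nil => simp
  | cons x xs ih => cases ys with
    | nil => simp at h
    | cons y ys => simp_all

-- the rule-major fold computes, pointwise over the zip, the conjunction of all per-rule misses
lemma fold_safe (lowered : List String) :
    ∀ (rules : List String) (safe : List Bool), safe.length = lowered.length →
    rules.foldl (fun safe rule =>
        (safe.zip lowered).map (fun p => p.1 && ! PySem.Str.isIn (PySem.Str.lower rule) p.2)) safe
      = (safe.zip lowered).map
          (fun p => p.1 && ! rules.any (fun r => PySem.Str.isIn (PySem.Str.lower r) p.2)) := by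
  intro rules
  induction rules with
  | nil =>
    intro safe h
    simpa using (zip_map_fst safe lowered h).symm
  | cons r rs ih =>
    intro safe h
    rw [List.foldl_cons, ih _ (by simp [h]), zip_map_left_zip, List.map_map]
    refine List.map_congr_left (fun p _ => ?_)
    simp [Bool.and_assoc]

-- zipping with a list derived pointwise from the replicate-zip is a map
lemma zip_replicate_map (xs : List String) (g : String → Bool) :
    xs.zip (((List.replicate xs.length true).zip (xs.map (fun r => PySem.Str.lower r))).map
        (fun p => p.1 && g p.2))
      = xs.map (fun x => (x, g (PySem.Str.lower x))) := by
  induction xs with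
  | nil => simp
  | cons x xs ih => simp [List.replicate_succ, ih]

-- ===== VERDICT (by name: the statement is the Claim_ definition above) =====
theorem label_responses_spec : Claim_equal_label_responses := by
  intro responses rules _
  unfold Spec_label_responses
  simp only [label_responses, label_responses_alt]
  rw [PySem.List.foldl_append_singleton_eq_map, List.nil_append,
    fold_safe _ _ _ (by simp),
    zip_replicate_map responses
      (fun t => ! rules.any (fun r => PySem.Str.isIn (PySem.Str.lower r) t))]
  refine List.map_congr_left (fun resp _ => ?_)
  simp [List.any_map, Function.comp_def, PySem.Str.toList_lower]
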